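-- pv_equiv track=rewrite | github.com/raneshrk02/talent_hiring | backend/app/routes/chat.py | order_skills_by_user_input
-- ===== SOURCE A (Python) =====
-- def order_skills_by_user_input(user_message: str, skills):
--     """Reorder extracted skills to follow the order they appeared in the original user message.
--     If a skill is not found (LLM-added), it is appended at the end preserving relative order.
--     """
--     user_lower = user_message.lower()
--     positions = []
--     not_found = []
--     for s in skills:
--         idx = user_lower.find(s.lower())
--         if idx == -1:
--             not_found.append(s)
--         else:
--             positions.append((idx, s))
--     ordered = [s for _, s in sorted(positions, key=lambda t: t[0])]
--     ordered.extend([s for s in skills if s in not_found])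
--     return ordered
-- ===== SOURCE B (Python) =====
-- def order_skills_by_user_input(user_message: str, skills):
--     """Reorder extracted skills to follow the order they appeared in the original user message.
--     If a skill is not found (LLM-added), it is appended at the end preserving relative order.
--     """
--     user_lower = user_message.lower()
--     sentinel = len(user_lower) + 1
--     def key(s):
--         i = user_lower.find(s.lower())
--         return i if i != -1 else sentinel
--     return sorted(skills, key=key)
-- ===== Notes on version B (the rewrite author's own statement) =====
-- stated objective: simpler
-- what changed: Replaced A's two-bucket partition, separate sort of (index, skill) pairs and a final list-membership filter pass with a single stable keyed sort whose key is the first-occurrence index, using len(user_lower)+1 as the not-found sentinel; this also drops A's O(n^2) 's in not_found' membership scan.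
import Mathlib
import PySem

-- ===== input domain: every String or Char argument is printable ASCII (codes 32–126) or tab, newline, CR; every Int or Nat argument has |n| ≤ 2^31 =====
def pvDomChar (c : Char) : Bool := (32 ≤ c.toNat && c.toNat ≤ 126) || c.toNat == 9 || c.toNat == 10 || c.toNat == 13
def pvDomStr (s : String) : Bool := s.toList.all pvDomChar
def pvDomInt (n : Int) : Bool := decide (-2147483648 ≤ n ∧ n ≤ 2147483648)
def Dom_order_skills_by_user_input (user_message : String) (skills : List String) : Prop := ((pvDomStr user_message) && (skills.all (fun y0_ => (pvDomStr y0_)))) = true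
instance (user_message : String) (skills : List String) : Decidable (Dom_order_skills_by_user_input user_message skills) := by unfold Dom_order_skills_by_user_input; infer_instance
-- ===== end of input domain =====

-- B replaces A's two-bucket partition + sort + membership filter by ONE stable keyed sort
-- (key = first-occurrence index, sentinel len+1 for not-found); objective: simpler.

-- ===== PORT A =====
def order_skills_by_user_input (user_message : String) (skills : List String) : List String :=
  let user_lower := PySem.Str.lower user_message
  let st := skills.foldl
    (fun (acc : List (Int × String) × List String) s =>
      let idx := PySem.Str.find user_lower (PySem.Str.lower s)
      if idx = -1 then (acc.1, acc.2 ++ [s]) else (acc.1 ++ [(idx, s)], acc.2))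
    ([], [])
  let ordered := (PySem.List.sorted st.1 (fun t => t.1)).map (fun t => t.2)
  ordered ++ skills.filter (fun s => decide (s ∈ st.2))

-- ===== PORT B =====
def order_skills_by_user_input_alt (user_message : String) (skills : List String) : List String :=
  let user_lower := PySem.Str.lower user_message
  let sentinel := PySem.Str.len user_lower + 1
  PySem.List.sorted skills (fun s =>
    let i := PySem.Str.find user_lower (PySem.Str.lower s)
    if i ≠ -1 then i else sentinel)

-- ===== PRECONDITION & SPEC =====
def Spec_order_skills_by_user_input (user_message : String) (skills : List String) (out : List String) : Prop := out = order_skills_by_user_input_alt user_message skills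
instance (user_message : String) (skills : List String) (out : List String) : Decidable (Spec_order_skills_by_user_input user_message skills out) := by unfold Spec_order_skills_by_user_input; infer_instance

-- ===== CLAIM (what is proved, stated in full; the proofs are below) =====
def Claim_equal_order_skills_by_user_input : Prop := ∀ (user_message : String) (skills : List String), Dom_order_skills_by_user_input user_message skills → Spec_order_skills_by_user_input user_message skills (order_skills_by_user_input user_message skills)

-- ===== LEMMAS AND PROOFS =====

-- Inserting an element whose key is below the sentinel into `a ++ b`, where all of `b`
-- carries the sentinel key, lands inside `a`.
theorem pv_ins_append {α : Type} (key : α → Int) (M : Int) (x : α) (a b : List α)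
    (hx : key x < M) (hb : ∀ y ∈ b, key y = M) :
    PySem.List.insertBy (fun p q => decide (key p < key q)) x (a ++ b)
      = PySem.List.insertBy (fun p q => decide (key p < key q)) x a ++ b := by
  induction a with
  | nil =>
    cases b with
    | nil => rfl
    | cons y ys =>
      have h : key x < key y := by rw [hb y (by simp)]; exact hx
      simp [PySem.List.insertBy, h]
  | cons a0 a' ih =>
    by_cases h : key x < key a0
    · simp [PySem.List.insertBy, h]
    · simp [PySem.List.insertBy, h, ih]

-- The insertion-sort fold splits: elements keyed below M are sorted in front, elements
-- keyed exactly M accumulate behind in arrival order.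
theorem pv_fold_split {α : Type} (key : α → Int) (M : Int) :
    ∀ (xs a b : List α), (∀ y ∈ a, key y < M) → (∀ y ∈ b, key y = M) → (∀ x ∈ xs, key x ≤ M) →
    xs.foldl (fun acc x => PySem.List.insertBy (fun p q => decide (key p < key q)) x acc) (a ++ b)
      = (xs.filter (fun x => decide (key x < M))).foldl
          (fun acc x => PySem.List.insertBy (fun p q => decide (key p < key q)) x acc) a
        ++ (b ++ xs.filter (fun x => decide (key x = M))) := by
  intro xs
  induction xs with
  | nil => intro a b _ _ _; simp
  | cons x t ih =>
    intro a b ha hb hle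
    by_cases hx : key x < M
    · have hne : ¬ key x = M := by omega
      rw [List.foldl_cons, pv_ins_append key M x a b hx hb]
      rw [ih _ b (fun y hy => by
            rcases (PySem.List.mem_insertBy _ x y a).1 hy with h | h
            · exact h ▸ hx
            · exact ha y h) hb (fun z hz => hle z (by simp [hz]))]
      simp [hx, hne]
    · have hxM : key x = M := le_antisymm (hle x (by simp)) (by omega)
      have hstep : PySem.List.insertBy (fun p q => decide (key p < key q)) x (a ++ b)
          = a ++ (b ++ [x]) := by
        rw [PySem.List.insertBy_of_forall_not_before _ x (a ++ b) (fun y hy => by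
          rcases List.mem_append.1 hy with h | h
          · have := ha y h; simp; omega
          · have := hb y h; simp; omega)]
        simp
      rw [List.foldl_cons, hstep]
      rw [ih a (b ++ [x]) ha (fun y hy => by
            rcases List.mem_append.1 hy with h | h
            · exact hb y h
            · simp at h; exact h ▸ hxM) (fun z hz => hle z (by simp [hz]))]
      simp [hxM]

-- Insertion of a (key, value) pair mirrors insertion of the value, when `k` agrees with
-- the stored first components.
theorem pv_pair_ins {α : Type} (k g : α → Int) (x : α) (acc : List α)
    (hx : k x = g x) (hacc : ∀ y ∈ acc, k y = g y) :
    PySem.List.insertBy (fun p q => decide (p.1 < q.1)) (g x, x)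
        (acc.map (fun s => (g s, s)))
      = (PySem.List.insertBy (fun p q => decide (k p < k q)) x acc).map (fun s => (g s, s)) := by
  induction acc with
  | nil => rfl
  | cons y ys ih =>
    have hy : k y = g y := hacc y (by simp)
    by_cases h : k x < k y
    · have h' : g x < g y := by rw [← hx, ← hy]; exact h
      simp [PySem.List.insertBy, h, h']
    · have h' : ¬ g x < g y := by rw [← hx, ← hy]; exact h
      simp [PySem.List.insertBy, h, h', ih (fun z hz => hacc z (by simp [hz]))]

-- The pair-sorting fold mirrors the value-sorting fold.
theorem pv_pair_fold {α : Type} (k g : α → Int) :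
    ∀ (F acc : List α), (∀ s ∈ F, k s = g s) → (∀ s ∈ acc, k s = g s) →
    (F.map (fun s => (g s, s))).foldl
        (fun acc x => PySem.List.insertBy (fun p q => decide (p.1 < q.1)) x acc)
        (acc.map (fun s => (g s, s)))
      = (F.foldl (fun acc x => PySem.List.insertBy (fun p q => decide (k p < k q)) x acc) acc).map
          (fun s => (g s, s)) := by
  intro F
  induction F with
  | nil => intro acc _ _; rfl
  | cons s t ih =>
    intro acc hF hacc
    rw [List.map_cons, List.foldl_cons, List.foldl_cons,
      pv_pair_ins k g s acc (hF s (by simp)) hacc]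
    exact ih _ (fun z hz => hF z (by simp [hz])) (fun z hz => by
      rcases (PySem.List.mem_insertBy _ s z acc).1 hz with h | h
      · exact h ▸ hF s (by simp)
      · exact hacc z h)

-- A's two-accumulator loop computes the filtered pair list and the not-found list.
theorem pv_loop_split (g : String → Int) :
    ∀ (xs : List String) (a : List (Int × String)) (b : List String),
    xs.foldl (fun (acc : List (Int × String) × List String) s =>
        if g s = -1 then (acc.1, acc.2 ++ [s]) else (acc.1 ++ [(g s, s)], acc.2)) (a, b)
      = (a ++ (xs.filter (fun s => decide (¬ g s = -1))).map (fun s => (g s, s)),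
         b ++ xs.filter (fun s => decide (g s = -1))) := by
  intro xs
  induction xs with
  | nil => intro a b; simp
  | cons s t ih =>
    intro a b
    by_cases h : g s = -1
    · simp only [List.foldl_cons, if_pos h]
      rw [ih]
      simp [h]
    · simp only [List.foldl_cons, if_neg h]
      rw [ih]
      simp [h]

-- ===== VERDICT (by name: the statement is the Claim_ definition above) =====
set_option maxHeartbeats 1000000 in
theorem order_skills_by_user_input_spec : Claim_equal_order_skills_by_user_input := by
  intro user_message skills _
  unfold Spec_order_skills_by_user_input
  unfold order_skills_by_user_input order_skills_by_user_input_alt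
  simp only [pv_loop_split, List.nil_append]
  set ul := PySem.Str.lower user_message with hul
  have hfind : ∀ s : String, PySem.Str.find ul (PySem.Str.lower s) ≤ PySem.Str.len ul := by
    intro s
    rw [PySem.Str.find_eq, PySem.Str.len_eq]
    exact PySem.Chars.find_le_length _ _
  -- the membership filter reproduces the not-found list
  have hNF : List.filter
      (fun s => decide (s ∈ List.filter (fun s => decide (PySem.Str.find ul (PySem.Str.lower s) = -1)) skills))
      skills
      = List.filter (fun s => decide (PySem.Str.find ul (PySem.Str.lower s) = -1)) skills := by
    apply List.filter_congr
    intro x hx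
    simp only [List.mem_filter, decide_eq_true_eq, hx, true_and]
  rw [hNF]
  -- split B's single stable sort into its found part and its not-found tail
  have hle : ∀ x ∈ skills,
      (fun s => if PySem.Str.find ul (PySem.Str.lower s) ≠ -1 then PySem.Str.find ul (PySem.Str.lower s)
        else PySem.Str.len ul + 1) x ≤ PySem.Str.len ul + 1 := by
    intro x _
    beta_reduce
    by_cases h : PySem.Str.find ul (PySem.Str.lower x) = -1
    · rw [if_neg (not_not_intro h)]
    · rw [if_pos h]
      have := hfind x
      omega
  have hsplit := pv_fold_split
    (fun s => if PySem.Str.find ul (PySem.Str.lower s) ≠ -1 then PySem.Str.find ul (PySem.Str.lower s)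
      else PySem.Str.len ul + 1)
    (PySem.Str.len ul + 1) skills [] [] (by simp) (by simp) hle
  simp only [List.nil_append] at hsplit
  beta_reduce at hsplit
  rw [PySem.List.sorted_eq_foldl_insertBy skills]
  rw [hsplit]
  congr 1
  -- found part: pair sort mirrors keyed sort
  · have hFF : List.filter
        (fun x => decide ((if PySem.Str.find ul (PySem.Str.lower x) ≠ -1 then PySem.Str.find ul (PySem.Str.lower x)
          else PySem.Str.len ul + 1) < PySem.Str.len ul + 1)) skills
        = List.filter (fun s => decide (¬ PySem.Str.find ul (PySem.Str.lower s) = -1)) skills := by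
      apply List.filter_congr
      intro x _
      simp only [decide_eq_decide]
      by_cases h : PySem.Str.find ul (PySem.Str.lower x) = -1
      · rw [if_neg (not_not_intro h)]
        exact ⟨fun hc => absurd hc (lt_irrefl _), fun hc => absurd h hc⟩
      · rw [if_pos h]
        have := hfind x
        exact ⟨fun _ => h, fun _ => by omega⟩
    rw [hFF]
    have hF : ∀ s ∈ List.filter (fun s => decide (¬ PySem.Str.find ul (PySem.Str.lower s) = -1)) skills,
        (fun s => if PySem.Str.find ul (PySem.Str.lower s) ≠ -1 then PySem.Str.find ul (PySem.Str.lower s)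
          else PySem.Str.len ul + 1) s = (fun s => PySem.Str.find ul (PySem.Str.lower s)) s := by
      intro s hs
      simp only [List.mem_filter, decide_eq_true_eq] at hs
      beta_reduce
      rw [if_pos hs.2]
    have hpf := pv_pair_fold
      (fun s => if PySem.Str.find ul (PySem.Str.lower s) ≠ -1 then PySem.Str.find ul (PySem.Str.lower s)
        else PySem.Str.len ul + 1)
      (fun s => PySem.Str.find ul (PySem.Str.lower s))
      (List.filter (fun s => decide (¬ PySem.Str.find ul (PySem.Str.lower s) = -1)) skills) [] hF (by simp)
    simp only [List.map_nil] at hpf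
    beta_reduce at hpf
    rw [PySem.List.sorted_eq_foldl_insertBy]
    rw [hpf, List.map_map]
    exact List.map_id _
  -- not-found tail: the two filters agree pointwise
  · apply List.filter_congr
    intro x _
    simp only [decide_eq_decide]
    by_cases h : PySem.Str.find ul (PySem.Str.lower x) = -1
    · rw [if_neg (not_not_intro h)]
      exact ⟨fun _ => rfl, fun _ => h⟩
    · rw [if_pos h]
      have := hfind x
      exact ⟨fun hc => absurd hc h, fun hc => by omega⟩
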